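-- pv_equiv track=rewrite | github.com/stikeleather/ErrorRateAnalysis | codon_bias.py | calculate_min_mismatches
-- ===== SOURCE A (Python) =====
-- def calculate_min_mismatches(target_string, string_list):
-- 	min_mismatches = []
-- 	min_positions = []
-- 	for string in string_list:
-- 		mismatch_count = sum(a != b for a, b in zip(target_string, string))
-- 		min_mismatches.append(mismatch_count)
--
-- 	minimum_mismatch = min(min_mismatches)
-- 	for string in string_list:
-- 		mismatch_count = sum(a != b for a, b in zip(target_string, string))
-- 		if mismatch_count == minimum_mismatch:
-- 			positions = [i + 1 for i, (a, b) in enumerate(zip(target_string, string)) if a != b]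
-- 			min_positions.append(positions)
-- 	return minimum_mismatch, min_positions
-- ===== SOURCE B (Python) =====
-- def calculate_min_mismatches(target_string, string_list):
-- 	pairs = []
-- 	for string in string_list:
-- 		positions = [i + 1 for i, (a, b) in enumerate(zip(target_string, string)) if a != b]
-- 		pairs.append((len(positions), positions))
-- 	minimum_mismatch = min(c for c, _ in pairs)
-- 	min_positions = [p for c, p in pairs if c == minimum_mismatch]
-- 	return minimum_mismatch, min_positions
-- ===== Notes on version B (the rewrite author's own statement) =====
-- stated objective: simpler
-- what changed: One pass builds a (count, positions) table computing both together (count = len(positions)), then min and a selection over the table replace A's second rescan of the strings with recomputed mismatch counts and positions.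
import Mathlib
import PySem

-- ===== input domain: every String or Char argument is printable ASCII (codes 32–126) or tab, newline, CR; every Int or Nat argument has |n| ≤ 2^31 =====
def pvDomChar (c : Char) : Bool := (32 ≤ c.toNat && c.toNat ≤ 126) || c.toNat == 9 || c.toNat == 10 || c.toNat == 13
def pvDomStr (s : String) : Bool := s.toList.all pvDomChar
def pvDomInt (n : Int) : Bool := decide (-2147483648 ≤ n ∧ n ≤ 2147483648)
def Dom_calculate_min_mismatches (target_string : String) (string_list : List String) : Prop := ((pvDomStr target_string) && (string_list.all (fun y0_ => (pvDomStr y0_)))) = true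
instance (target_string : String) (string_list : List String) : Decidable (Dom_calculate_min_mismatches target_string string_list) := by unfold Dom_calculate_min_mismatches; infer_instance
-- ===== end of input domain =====

-- B builds one (count, positions) table per string in a single pass (count = positions.length),
-- then selects from the table, instead of A's two passes recomputing counts and positions. Objective: simpler.


-- ===== PORT A =====
-- sum(a != b for a, b in zip(target_string, string))
def pvMismCountA (target_string string : String) : Int :=
  (target_string.toList.zip string.toList).foldl
    (fun acc p => acc + (if p.1 != p.2 then 1 else 0)) 0

-- [i + 1 for i, (a, b) in enumerate(zip(target_string, string)) if a != b]
def pvPositionsA (target_string string : String) : List Int :=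
  ((PySem.List.enumerate (target_string.toList.zip string.toList)).filter
    (fun p => p.2.1 != p.2.2)).map (fun p => p.1 + 1)

def calculate_min_mismatches (target_string : String) (string_list : List String) : Int × List (List Int) :=
  let min_mismatches := string_list.foldl (fun acc s => acc ++ [pvMismCountA target_string s]) []
  match PySem.List.min? min_mismatches (fun x => x) with
  | none => (0, [])  -- min([]) raises ValueError in Python; excluded by Pre_
  | some minimum_mismatch =>
    let min_positions := string_list.foldl
      (fun acc s => if pvMismCountA target_string s == minimum_mismatch
                    then acc ++ [pvPositionsA target_string s] else acc) []
    (minimum_mismatch, min_positions)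

-- ===== PORT B =====
-- the same positions comprehension as in Source B's loop body
def pvPositionsB (target_string string : String) : List Int :=
  ((PySem.List.enumerate (target_string.toList.zip string.toList)).filter
    (fun p => p.2.1 != p.2.2)).map (fun p => p.1 + 1)

def calculate_min_mismatches_alt (target_string : String) (string_list : List String) : Int × List (List Int) :=
  let pairs := string_list.foldl
    (fun acc s => let positions := pvPositionsB target_string s
                  acc ++ [((positions.length : Int), positions)]) []
  match PySem.List.min? (pairs.map Prod.fst) (fun x => x) with
  | none => (0, [])  -- min of empty generator raises ValueError; excluded by Pre_
  | some minimum_mismatch =>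
    (minimum_mismatch, (pairs.filter (fun p => p.1 == minimum_mismatch)).map Prod.snd)

-- ===== PRECONDITION & SPEC =====
-- Pre_ excludes only the empty string_list, on which Python's min([]) raises ValueError in both A and B.
def Pre_calculate_min_mismatches (target_string : String) (string_list : List String) : Prop := string_list ≠ []
instance (target_string : String) (string_list : List String) : Decidable (Pre_calculate_min_mismatches target_string string_list) := by unfold Pre_calculate_min_mismatches; infer_instance
def pvWitness_calculate_min_mismatches : String × List String := ("abc", ["abd", "xbc"])

def Spec_calculate_min_mismatches (target_string : String) (string_list : List String) (out : Int × List (List Int)) : Prop := out = calculate_min_mismatches_alt target_string string_list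
instance (target_string : String) (string_list : List String) (out : Int × List (List Int)) : Decidable (Spec_calculate_min_mismatches target_string string_list out) := by unfold Spec_calculate_min_mismatches; infer_instance

-- ===== CLAIM (what is proved, stated in full; the proofs are below) =====
def Claim_equal_calculate_min_mismatches : Prop := ∀ (target_string : String) (string_list : List String), Dom_calculate_min_mismatches target_string string_list → Pre_calculate_min_mismatches target_string string_list → Spec_calculate_min_mismatches target_string string_list (calculate_min_mismatches target_string string_list)

-- ===== LEMMAS AND PROOFS =====

theorem pvFoldlCount (zs : List (Char × Char)) (acc : Int) :
    zs.foldl (fun a p => a + (if p.1 != p.2 then 1 else 0)) acc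
    = acc + ((zs.filter (fun p => p.1 != p.2)).length : Int) := by
  induction zs generalizing acc with
  | nil => simp
  | cons z zs ih =>
    simp only [List.foldl_cons, List.filter_cons, ih]
    split
    · simp; omega
    · simp

theorem pvEnumFilterLen (zs : List (Char × Char)) (n : Int) :
    ((PySem.List.enumerate zs n).filter (fun p => p.2.1 != p.2.2)).length
    = (zs.filter (fun p => p.1 != p.2)).length := by
  induction zs generalizing n with
  | nil => simp [PySem.List.enumerate_nil]
  | cons z zs ih =>
    simp only [PySem.List.enumerate_cons, List.filter_cons]
    split <;> simp [ih]

-- A's summed mismatch count equals the length of the positions list.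
theorem pvMism_eq_len (t s : String) :
    pvMismCountA t s = ((pvPositionsA t s).length : Int) := by
  unfold pvMismCountA pvPositionsA
  rw [pvFoldlCount]
  simp [pvEnumFilterLen]

theorem pvPosB_eq_A (t s : String) : pvPositionsB t s = pvPositionsA t s := rfl

-- ===== VERDICT (by name: the statement is the Claim_ definition above) =====
theorem calculate_min_mismatches_spec : Claim_equal_calculate_min_mismatches := by
  intro t sl _ _
  unfold Spec_calculate_min_mismatches calculate_min_mismatches calculate_min_mismatches_alt
  have h2 : ∀ s, ((pvPositionsA t s).length : Int) = pvMismCountA t s :=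
    fun s => (pvMism_eq_len t s).symm
  simp only [PySem.List.foldl_append_singleton_eq_map, List.nil_append, List.map_map]
  have hf : (Prod.fst ∘ fun s => (((pvPositionsB t s).length : Int), pvPositionsB t s))
      = pvMismCountA t := by
    funext s; simp only [Function.comp_apply, pvPosB_eq_A, h2]
  rw [hf]
  cases hmin : PySem.List.min? (sl.map (pvMismCountA t)) (fun x => x) with
  | none => rfl
  | some m =>
    simp only [PySem.List.foldl_append_if, List.nil_append, List.filter_map, List.map_map]
    simp [Function.comp_def, pvPosB_eq_A, h2]
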